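-- pv_equiv track=rewrite | github.com/Extrieve/HackerRank-Python | following_direction.py | eat_candy
-- ===== SOURCE A (Python) =====
-- def eat_candy(directions):
--     candy, initial = [1, 1], [0, 0]
--     for direction in directions:
--         if 'U' == direction:
--             initial[1] += 1
--         elif 'D' == direction:
--             initial[1] -= 1
--         elif 'R' == direction:
--             initial[0] += 1
--         elif 'L' == direction:
--             initial[0] -= 1
--
--         if candy == initial:
--             return 'YES'
--
--     return 'NO'
-- ===== SOURCE B (Python) =====
-- def eat_candy(directions):
--     # Compute the final position by counting each move type, then walk the
--     # path BACKWARDS, undoing one move at a time and testing for (1,1).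
--     x = directions.count('R') - directions.count('L')
--     y = directions.count('U') - directions.count('D')
--     for d in reversed(directions):
--         if (x, y) == (1, 1):
--             return 'YES'
--         if d == 'R':
--             x -= 1
--         elif d == 'L':
--             x += 1
--         elif d == 'U':
--             y -= 1
--         elif d == 'D':
--             y += 1
--     return 'NO'
-- ===== Notes on version B (the rewrite author's own statement) =====
-- stated objective: alternative
-- what changed: Instead of simulating the walk forwards, B computes the endpoint by four counting passes and then traverses the directions in reverse, undoing one move at a time and testing each intermediate position against (1,1).
import Mathlib
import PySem

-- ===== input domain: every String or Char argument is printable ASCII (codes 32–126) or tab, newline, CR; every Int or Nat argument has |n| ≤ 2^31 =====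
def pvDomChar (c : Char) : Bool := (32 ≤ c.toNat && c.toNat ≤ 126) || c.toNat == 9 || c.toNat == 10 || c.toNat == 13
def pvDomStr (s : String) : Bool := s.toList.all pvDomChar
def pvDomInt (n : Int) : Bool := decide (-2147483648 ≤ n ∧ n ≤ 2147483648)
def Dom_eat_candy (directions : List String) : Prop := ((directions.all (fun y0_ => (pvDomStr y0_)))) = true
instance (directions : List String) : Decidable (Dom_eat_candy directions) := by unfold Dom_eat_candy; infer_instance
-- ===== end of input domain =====

-- B replaces the forward simulation by four counting passes for the endpoint plus a
-- reverse walk that undoes one move at a time; return value proved equal to A's on all inputs.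

-- ===== PORT A =====
-- A's loop with early return: state 'initial' as a pair, candy = (1,1)
def eat_candy_loop (initial : Int × Int) (dirs : List String) : String :=
  match dirs with
  | [] => "NO"
  | d :: rest =>
    let initial' :=
      if "U" = d then (initial.1, initial.2 + 1)
      else if "D" = d then (initial.1, initial.2 - 1)
      else if "R" = d then (initial.1 + 1, initial.2)
      else if "L" = d then (initial.1 - 1, initial.2)
      else initial
    if ((1 : Int), (1 : Int)) = initial' then "YES" else eat_candy_loop initial' rest

def eat_candy (directions : List String) : String :=
  eat_candy_loop (0, 0) directions

-- ===== PORT B =====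
-- B's backward loop: check the current position, then undo the move d
def eat_candy_alt_loop (x y : Int) (ds : List String) : String :=
  match ds with
  | [] => "NO"
  | d :: rest =>
    if ((x, y) : Int × Int) = (1, 1) then "YES"
    else if d = "R" then eat_candy_alt_loop (x - 1) y rest
    else if d = "L" then eat_candy_alt_loop (x + 1) y rest
    else if d = "U" then eat_candy_alt_loop x (y - 1) rest
    else if d = "D" then eat_candy_alt_loop x (y + 1) rest
    else eat_candy_alt_loop x y rest

def eat_candy_alt (directions : List String) : String :=
  eat_candy_alt_loop
    ((PySem.List.count directions "R" : Int) - (PySem.List.count directions "L" : Int))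
    ((PySem.List.count directions "U" : Int) - (PySem.List.count directions "D" : Int))
    directions.reverse

-- ===== PRECONDITION & SPEC =====
def Spec_eat_candy (directions : List String) (out : String) : Prop := out = eat_candy_alt directions
instance (directions : List String) (out : String) : Decidable (Spec_eat_candy directions out) := by unfold Spec_eat_candy; infer_instance

-- ===== CLAIM =====
def Claim_equal_eat_candy : Prop := ∀ (directions : List String), Dom_eat_candy directions → Spec_eat_candy directions (eat_candy directions)

-- ===== LEMMAS AND PROOFS =====

-- A's forward step and B's backward (inverse) step, factored out for the proofs
def pvStep (p : Int × Int) (d : String) : Int × Int :=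
  if "U" = d then (p.1, p.2 + 1)
  else if "D" = d then (p.1, p.2 - 1)
  else if "R" = d then (p.1 + 1, p.2)
  else if "L" = d then (p.1 - 1, p.2)
  else p

def pvUnstep (p : Int × Int) (d : String) : Int × Int :=
  if d = "R" then (p.1 - 1, p.2)
  else if d = "L" then (p.1 + 1, p.2)
  else if d = "U" then (p.1, p.2 - 1)
  else if d = "D" then (p.1, p.2 + 1)
  else p

-- the positions A's loop tests, in order
def pvPositions (p : Int × Int) (dirs : List String) : List (Int × Int) :=
  match dirs with
  | [] => []
  | d :: rest => pvStep p d :: pvPositions (pvStep p d) rest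

-- the positions B's loop tests, in order
def pvChecked (p : Int × Int) (ds : List String) : List (Int × Int) :=
  match ds with
  | [] => []
  | d :: rest => p :: pvChecked (pvUnstep p d) rest

theorem loopA_eq_mem (dirs : List String) (p : Int × Int) :
    eat_candy_loop p dirs =
      (if ((1 : Int), (1 : Int)) ∈ pvPositions p dirs then "YES" else "NO") := by
  induction dirs generalizing p with
  | nil => simp [eat_candy_loop, pvPositions]
  | cons d rest ih =>
    rw [eat_candy_loop, pvPositions]
    show (if ((1:Int),(1:Int)) = pvStep p d then "YES" else eat_candy_loop (pvStep p d) rest) = _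
    by_cases h : ((1 : Int), (1 : Int)) = pvStep p d
    · simp [h.symm]
    · simp only [if_neg h, ih, List.mem_cons]
      by_cases hm : ((1 : Int), (1 : Int)) ∈ pvPositions (pvStep p d) rest
      · simp [hm]
      · simp [hm, h]

theorem loopB_eq_mem (ds : List String) (x y : Int) :
    eat_candy_alt_loop x y ds =
      (if ((1 : Int), (1 : Int)) ∈ pvChecked (x, y) ds then "YES" else "NO") := by
  induction ds generalizing x y with
  | nil => simp [eat_candy_alt_loop, pvChecked]
  | cons d rest ih =>
    rw [eat_candy_alt_loop, pvChecked]
    by_cases h : ((x, y) : Int × Int) = (1, 1)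
    · simp [h]
    · have hne : ((1 : Int), (1 : Int)) ≠ (x, y) := fun he => h he.symm
      have hmem : (((1 : Int), (1 : Int)) ∈ (x, y) :: pvChecked (pvUnstep (x, y) d) rest) ↔
          (((1 : Int), (1 : Int)) ∈ pvChecked (pvUnstep (x, y) d) rest) := by
        simp [List.mem_cons, hne]
      rw [if_neg h, if_congr hmem rfl rfl, pvUnstep]
      split_ifs <;> simp_all [ih]

theorem unstep_step (p : Int × Int) (d : String) : pvUnstep (pvStep p d) d = p := by
  by_cases hU : "U" = d
  · subst hU; simp [pvStep, pvUnstep]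
  · by_cases hD : "D" = d
    · subst hD; simp [pvStep, pvUnstep, hU]
    · by_cases hR : "R" = d
      · subst hR; simp [pvStep, pvUnstep, hU, hD]
      · by_cases hL : "L" = d
        · subst hL; simp [pvStep, pvUnstep, hU, hD, hR]
        · simp [pvStep, pvUnstep, hU, hD, hR, hL, Ne.symm hR, Ne.symm hL, Ne.symm hU, Ne.symm hD]

theorem foldl_unstep_reverse (l : List String) (q : Int × Int) :
    List.foldl pvUnstep (List.foldl pvStep q l) l.reverse = q := by
  induction l generalizing q with
  | nil => simp
  | cons d t ih =>
    simp only [List.foldl_cons, List.reverse_cons, List.foldl_append, List.foldl_cons,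
      List.foldl_nil]
    rw [ih (pvStep q d), unstep_step]

theorem checked_append (x : Int × Int) (l : List String) (d : String) :
    pvChecked x (l ++ [d]) = pvChecked x l ++ [List.foldl pvUnstep x l] := by
  induction l generalizing x with
  | nil => simp [pvChecked]
  | cons e t ih => simp [pvChecked, ih]

theorem checked_reverse (dirs : List String) (p : Int × Int) :
    pvChecked (List.foldl pvStep p dirs) dirs.reverse = (pvPositions p dirs).reverse := by
  induction dirs generalizing p with
  | nil => simp [pvChecked, pvPositions]
  | cons d rest ih =>
    simp only [List.foldl_cons, List.reverse_cons, pvPositions, List.reverse_cons]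
    rw [checked_append, ih (pvStep p d), foldl_unstep_reverse, ]

-- the endpoint is given by the four counts
theorem foldl_step_counts (dirs : List String) (p : Int × Int) :
    List.foldl pvStep p dirs =
      (p.1 + (PySem.List.count dirs "R" : Int) - (PySem.List.count dirs "L" : Int),
       p.2 + (PySem.List.count dirs "U" : Int) - (PySem.List.count dirs "D" : Int)) := by
  induction dirs generalizing p with
  | nil => simp [PySem.List.count_eq]
  | cons d rest ih =>
    simp only [List.foldl_cons, ih, PySem.List.count_eq, List.count_cons, pvStep]
    by_cases hU : "U" = d
    · subst hU; simp only [if_pos rfl, Prod.mk.injEq]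
      norm_num; push_cast; ring
    · by_cases hD : "D" = d
      · subst hD; simp only [if_neg hU, if_pos rfl, Prod.mk.injEq]
        simp [Ne.symm hU]; push_cast; ring
      · by_cases hR : "R" = d
        · subst hR; simp only [if_neg hU, if_neg hD, if_pos rfl, Prod.mk.injEq]
          simp [Ne.symm hU, Ne.symm hD]; push_cast; ring
        · by_cases hL : "L" = d
          · subst hL; simp only [if_neg hU, if_neg hD, if_neg hR, if_pos rfl, Prod.mk.injEq]
            simp [Ne.symm hU, Ne.symm hD, Ne.symm hR]; ring
          · simp [if_neg hU, if_neg hD, if_neg hR, if_neg hL,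
              Ne.symm hU, Ne.symm hD, Ne.symm hR, Ne.symm hL]

-- ===== VERDICT =====
theorem eat_candy_spec : Claim_equal_eat_candy := by
  intro directions _
  unfold Spec_eat_candy eat_candy eat_candy_alt
  rw [loopA_eq_mem, loopB_eq_mem]
  have h := checked_reverse directions (0, 0)
  rw [foldl_step_counts directions (0, 0)] at h
  simp only [zero_add] at h
  rw [h]
  simp [List.mem_reverse]
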